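-- pv_equiv track=rewrite | github.com/fcarucci/agentic-memory | scripts/memory-recall.py | _apply_budget
-- ===== SOURCE A (Python) =====
-- def _apply_budget(results: dict, budget: int) -> dict:
--     """Trim results to fit within a character budget.
--
--     Iterates through sections in priority order, keeping items until
--     the cumulative character count exceeds the budget. Roughly
--     approximates token count as chars / 4.
--     """
--     char_budget = budget * 4
--     used = 0
--     trimmed: dict = {}
--     for section_name in ("world_knowledge", "beliefs", "reflections",
--                           "experiences", "entity_summaries"):
--         items = results.get(section_name, [])
--         kept = []
--         for item in items:
--             item_len = len(item)
--             if used + item_len > char_budget: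
--                 break
--             kept.append(item)
--             used += item_len
--         if kept:
--             trimmed[section_name] = kept
--         if used >= char_budget:
--             break
--     return trimmed
-- ===== SOURCE B (Python) =====
-- def _apply_budget(results: dict, budget: int) -> dict:
--     """Trim results to fit a character budget via per-section cumulative totals."""
--     char_budget = budget * 4
--     used = 0
--     trimmed: dict = {}
--     for section_name in ("world_knowledge", "beliefs", "reflections",
--                          "experiences", "entity_summaries"):
--         items = results.get(section_name, [])
--         lens = [len(item) for item in items]
--         # cumulative totals, offset by the global 'used'
--         totals = []
--         t = used
--         for length in lens:
--             t += length
--             totals.append(t)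
--         # first index whose total exceeds the budget; keep everything before it
--         cut = len(items)
--         for i, total in enumerate(totals):
--             if total > char_budget:
--                 cut = i
--                 break
--         if cut:
--             trimmed[section_name] = items[:cut]
--         used += sum(lens[:cut])
--         if used >= char_budget:
--             break
--     return trimmed
-- ===== Notes on version B (the rewrite author's own statement) =====
-- stated objective: alternative
-- what changed: B computes, per section, the list of cumulative character totals and a cutoff index (first total over the budget), then keeps items[:cut] and advances used by sum(lens[:cut]), instead of A's item-by-item accumulate-and-break inner loop.
import Mathlib
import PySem

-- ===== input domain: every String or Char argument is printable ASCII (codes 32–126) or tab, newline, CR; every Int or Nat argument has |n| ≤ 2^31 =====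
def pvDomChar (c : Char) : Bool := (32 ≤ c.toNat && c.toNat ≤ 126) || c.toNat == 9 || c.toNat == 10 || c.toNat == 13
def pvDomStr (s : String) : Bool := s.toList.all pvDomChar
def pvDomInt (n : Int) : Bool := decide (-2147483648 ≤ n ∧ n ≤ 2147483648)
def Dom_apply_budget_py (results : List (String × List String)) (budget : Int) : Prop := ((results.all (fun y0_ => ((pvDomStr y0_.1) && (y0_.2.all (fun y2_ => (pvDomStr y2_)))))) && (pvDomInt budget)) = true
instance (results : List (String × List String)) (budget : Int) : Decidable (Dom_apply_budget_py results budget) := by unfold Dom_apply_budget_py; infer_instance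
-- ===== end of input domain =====

-- B restructures the per-section accumulate-and-break loop into a cumulative-totals table
-- plus a cutoff index; same cost ("alternative" objective), return values proved equal.

def pvSections : List String :=
  ["world_knowledge", "beliefs", "reflections", "experiences", "entity_summaries"]

-- ===== PORT A =====
-- inner loop of A: append items one by one, break when used + len(item) > char_budget
def pvAInner (cb : Int) (used : Int) : List String → List String × Int
  | [] => ([], used)
  | item :: rest =>
    let l := PySem.Str.len item
    if used + l > cb then ([], used)
    else
      let r := pvAInner cb (used + l) rest
      (item :: r.1, r.2)

def pvAOuter (results : List (String × List String)) (cb : Int) (used : Int) :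
    List String → List (String × List String)
  | [] => []
  | name :: rest =>
    let items := (PySem.Dict.mk results).getD name []
    let p := pvAInner cb used items
    let tr := if p.1 = [] then [] else [(name, p.1)]
    if p.2 ≥ cb then tr else tr ++ pvAOuter results cb p.2 rest

def apply_budget_py (results : List (String × List String)) (budget : Int) :
    List (String × List String) :=
  pvAOuter results (budget * 4) 0 pvSections

-- ===== PORT B =====
-- cumulative totals of the item lengths, offset by the running 'used'
def pvBTotals (t : Int) : List Int → List Int
  | [] => []
  | l :: rest => (t + l) :: pvBTotals (t + l) rest

-- first index whose total exceeds the budget (length of the list if none does)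
def pvBCut (cb : Int) : List Int → Nat
  | [] => 0
  | t :: rest => if t > cb then 0 else 1 + pvBCut cb rest

def pvBSection (cb : Int) (used : Int) (items : List String) : List String × Int :=
  let lens := items.map PySem.Str.len
  let totals := pvBTotals used lens
  let cut := pvBCut cb totals
  (items.take cut, used + (lens.take cut).sum)

def pvBOuter (results : List (String × List String)) (cb : Int) (used : Int) :
    List String → List (String × List String)
  | [] => []
  | name :: rest =>
    let items := (PySem.Dict.mk results).getD name []
    let p := pvBSection cb used items
    let tr := if p.1 = [] then [] else [(name, p.1)]
    if p.2 ≥ cb then tr else tr ++ pvBOuter results cb p.2 rest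

def apply_budget_py_alt (results : List (String × List String)) (budget : Int) :
    List (String × List String) :=
  pvBOuter results (budget * 4) 0 pvSections

-- ===== PRECONDITION & SPEC =====
def Spec_apply_budget_py (results : List (String × List String)) (budget : Int) (out : List (String × List String)) : Prop := out = apply_budget_py_alt results budget
instance (results : List (String × List String)) (budget : Int) (out : List (String × List String)) : Decidable (Spec_apply_budget_py results budget out) := by unfold Spec_apply_budget_py; infer_instance

-- ===== CLAIM (what is proved, stated in full; the proofs are below) =====
def Claim_equal_apply_budget_py : Prop := ∀ (results : List (String × List String)) (budget : Int), Dom_apply_budget_py results budget → Spec_apply_budget_py results budget (apply_budget_py results budget)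

-- ===== LEMMAS AND PROOFS =====

theorem pvInner_eq (cb : Int) (items : List String) :
    ∀ used, pvAInner cb used items = pvBSection cb used items := by
  induction items with
  | nil => intro used; simp [pvAInner, pvBSection, pvBTotals, pvBCut]
  | cons item rest ih =>
    intro used
    simp only [pvAInner, pvBSection, pvBTotals, pvBCut, List.map_cons]
    by_cases h : used + PySem.Str.len item > cb
    · rw [if_pos h, if_pos h]
      simp
    · rw [if_neg h, if_neg h, ih]
      simp only [pvBSection, Prod.mk.injEq, Nat.add_comm 1, List.take_succ_cons,
        List.sum_cons]
      exact ⟨trivial, by ring⟩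

theorem pvOuter_eq (results : List (String × List String)) (cb : Int)
    (names : List String) : ∀ used,
    pvAOuter results cb used names = pvBOuter results cb used names := by
  induction names with
  | nil => intro used; rfl
  | cons name rest ih =>
    intro used
    simp only [pvAOuter, pvBOuter, pvInner_eq, ih]

-- ===== VERDICT (by name: the statement is the Claim_ definition above) =====
theorem apply_budget_py_spec : Claim_equal_apply_budget_py := by
  intro results budget _
  unfold Spec_apply_budget_py apply_budget_py apply_budget_py_alt
  exact pvOuter_eq results (budget * 4) pvSections 0
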